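-- pv_equiv track=rewrite | github.com/DavidRSeWell/fptajax | examples/classical_fpta_suite/data/blotto.py | _multi_index_up_to
-- ===== SOURCE A (Python) =====
-- from itertools import combinations_with_replacement
--
-- def _multi_index_up_to(K: int, max_deg: int) -> list[tuple[int, ...]]:
--     """All multi-indices α ∈ ℤ^K_{≥0} with sum(α) ≤ max_deg."""
--     out: list[tuple[int, ...]] = []
--     for d in range(max_deg + 1):
--         for combo in combinations_with_replacement(range(K), d):
--             counts = [0] * K
--             for c in combo:
--                 counts[c] += 1
--             out.append(tuple(counts))
--     return out
-- ===== SOURCE B (Python) =====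
-- def _multi_index_up_to(K: int, max_deg: int) -> list[tuple[int, ...]]:
--     """All multi-indices α ∈ ℤ^K_{≥0} with sum(α) ≤ max_deg."""
--     out: list[tuple[int, ...]] = []
--     for d in range(max_deg + 1):
--         # DFS over compositions of d into K parts, explicit stack, prefixes
--         # shared as reversed linked lists; v pushed ascending so it pops descending.
--         stack = [(K, d, None)]
--         while stack:
--             k, budget, pre = stack.pop()
--             if k <= 0:
--                 if budget == 0:
--                     idx = []
--                     while pre is not None:
--                         v, pre = pre
--                         idx.append(v)
--                     idx.reverse()
--                     out.append(tuple(idx))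
--                 continue
--             for v in range(budget + 1):
--                 stack.append((k - 1, budget - v, (v, pre)))
--     return out
-- ===== Notes on version B (the rewrite author's own statement) =====
-- stated objective: alternative
-- what changed: B enumerates compositions directly by a recursion that assigns each coordinate from the remaining budget downward, instead of generating combinations_with_replacement tuples and rebuilding a counts array for each one.
import Mathlib
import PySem

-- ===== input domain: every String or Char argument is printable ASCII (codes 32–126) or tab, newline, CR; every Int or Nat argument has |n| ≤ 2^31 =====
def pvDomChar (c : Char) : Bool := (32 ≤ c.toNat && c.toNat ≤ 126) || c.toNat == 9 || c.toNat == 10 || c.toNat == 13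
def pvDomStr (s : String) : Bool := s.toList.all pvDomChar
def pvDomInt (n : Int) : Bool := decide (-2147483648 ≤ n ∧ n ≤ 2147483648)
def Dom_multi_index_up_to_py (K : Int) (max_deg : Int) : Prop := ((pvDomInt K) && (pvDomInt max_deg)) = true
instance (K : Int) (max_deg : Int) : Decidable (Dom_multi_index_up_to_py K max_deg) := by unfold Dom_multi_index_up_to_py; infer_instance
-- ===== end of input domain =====

-- B replaces combinations_with_replacement plus a per-combo counts rebuild by a direct
-- recursion over compositions (first coordinate descending), same output; objective: alternative.

-- ===== PORT A =====
-- itertools.combinations_with_replacement(range(K), d): all nondecreasing d-tuples over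
-- [lo, K) in lexicographic order; this recursive generation is the standard-library call's
-- behaviour (first element j ascending, rest drawn from [j, K)).
def pvCwr (lo K : Int) (d : Nat) : List (List Int) :=
  match d with
  | 0 => [[]]
  | d + 1 => (PySem.List.pyRange lo K 1).flatMap (fun j => (pvCwr j K d).map (j :: ·))

-- counts = [0]*K; for c in combo: counts[c] += 1   (c is always in range, so set/getD are exact)
def pvCounts (n : Nat) (combo : List Int) : List Int :=
  combo.foldl (fun counts c => counts.set c.toNat (counts.getD c.toNat 0 + 1)) (List.replicate n 0)

def multi_index_up_to_py (K : Int) (max_deg : Int) : List (List Int) :=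
  (PySem.List.pyRange 0 (max_deg + 1) 1).foldl
    (fun out d => out ++ (pvCwr 0 K d.toNat).map (pvCounts K.toNat)) []

-- ===== PORT B =====
-- termination measure for the explicit stack: each frame (k, budget, pre) weighs
-- (budget.toNat + 2)^(k+1); popping a frame pushes children of strictly smaller total weight
def pvW (f : Nat × Int × List Int) : Nat := (f.2.1.toNat + 2) ^ (f.1 + 1)

theorem pvW_push_lt (k : Nat) (b : Int) (pre : List Int) :
    ((PySem.List.pyRange 0 (b + 1) 1).map (fun v => pvW (k, b - v, v :: pre))).sum
    < pvW (k + 1, b, pre) := by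
  simp only [pvW]
  by_cases hb : 0 ≤ b
  · have hlen : ((PySem.List.pyRange 0 (b + 1) 1).map
        (fun v => ((b - v).toNat + 2) ^ (k + 1))).length = b.toNat + 1 := by
      rw [List.length_map, PySem.List.length_pyRange_one]; omega
    have hbound : ∀ x ∈ (PySem.List.pyRange 0 (b + 1) 1).map
        (fun v => ((b - v).toNat + 2) ^ (k + 1)), x ≤ (b.toNat + 2) ^ (k + 1) := by
      intro x hx
      obtain ⟨v, hv, rfl⟩ := List.mem_map.mp hx
      rw [PySem.List.mem_pyRange_one] at hv
      exact Nat.pow_le_pow_left (by omega) (k + 1)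
    have := List.sum_le_card_nsmul _ _ hbound
    rw [hlen, smul_eq_mul] at this
    calc ((PySem.List.pyRange 0 (b + 1) 1).map
            (fun v => ((b - v).toNat + 2) ^ (k + 1))).sum
        ≤ (b.toNat + 1) * (b.toNat + 2) ^ (k + 1) := this
      _ < (b.toNat + 2) * (b.toNat + 2) ^ (k + 1) := by
          have hp : 0 < (b.toNat + 2) ^ (k + 1) := pow_pos (by omega) _
          exact (Nat.mul_lt_mul_right hp).mpr (by omega)
      _ = (b.toNat + 2) ^ (k + 2) := by ring
  · rw [PySem.List.pyRange_one_eq_nil (by omega)]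
    positivity

-- the while-stack loop: stack head = top; for v in range(budget+1): push — so the children
-- list is reversed onto the head; the emit branch's unlink-then-reverse loop is pre.reverse
def pvLoop (stack : List (Nat × Int × List Int)) (out : List (List Int)) : List (List Int) :=
  match stack with
  | [] => out
  | (k, b, pre) :: rest =>
    match k with
    | 0 => pvLoop rest (if b = 0 then out ++ [pre.reverse] else out)
    | k + 1 =>
      pvLoop ((((PySem.List.pyRange 0 (b + 1) 1).map
        (fun v => (k, b - v, v :: pre))).reverse) ++ rest) out
termination_by (stack.map pvW).sum
decreasing_by
  · simp only [List.map_cons, List.sum_cons, pvW]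
    have : 0 < (b.toNat + 2) ^ (0 + 1) := pow_pos (by omega) _
    omega
  · simp only [List.map_cons, List.sum_cons, List.map_append, List.sum_append,
      List.map_reverse, List.sum_reverse, List.map_map, Function.comp_def,
      Nat.succ_eq_add_one]
    have h := pvW_push_lt k b pre
    omega

-- Python's k ≤ 0 base is reached exactly when the Nat fuel K.toNat runs out,
-- since k only decreases by 1 from K
def multi_index_up_to_py_alt (K : Int) (max_deg : Int) : List (List Int) :=
  (PySem.List.pyRange 0 (max_deg + 1) 1).foldl (fun out d => pvLoop [(K.toNat, d, [])] out) []

-- ===== PRECONDITION & SPEC =====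
def Spec_multi_index_up_to_py (K : Int) (max_deg : Int) (out : List (List Int)) : Prop := out = multi_index_up_to_py_alt K max_deg
instance (K : Int) (max_deg : Int) (out : List (List Int)) : Decidable (Spec_multi_index_up_to_py K max_deg out) := by unfold Spec_multi_index_up_to_py; infer_instance

-- ===== CLAIM (what is proved, stated in full; the proofs are below) =====
def Claim_equal_multi_index_up_to_py : Prop := ∀ (K : Int) (max_deg : Int), Dom_multi_index_up_to_py K max_deg → Spec_multi_index_up_to_py K max_deg (multi_index_up_to_py K max_deg)

-- ===== LEMMAS AND PROOFS =====

-- proof-side recursive enumerator of the compositions DFS (what one stack frame produces)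
def pvRec (k : Nat) (budget : Int) (pre : List Int) : List (List Int) :=
  match k with
  | 0 => if budget = 0 then [pre] else []
  | k + 1 => (PySem.List.pyRange budget (-1) (-1)).flatMap
      (fun v => pvRec k (budget - v) (pre ++ [v]))

theorem pvLoop_spec (stack : List (Nat × Int × List Int)) (out : List (List Int)) :
    pvLoop stack out = out ++ stack.flatMap (fun f => pvRec f.1 f.2.1 f.2.2.reverse) := by
  induction stack, out using pvLoop.induct with
  | case1 out => simp [pvLoop]
  | case2 out b pre rest ih =>
    rw [show pvLoop ((0, b, pre) :: rest) out
        = pvLoop rest (if b = 0 then out ++ [pre.reverse] else out) from by rw [pvLoop]]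
    by_cases hb : b = 0
    · subst hb
      rw [dif_pos rfl] at ih
      simp only [List.unattach_reverse, List.unattach_attach] at ih
      rw [if_pos rfl, ih]
      simp [pvRec]
    · rw [dif_neg hb] at ih
      rw [if_neg hb, ih]
      simp [pvRec, hb]
  | case3 out b pre rest k ih =>
    rw [show pvLoop ((k + 1, b, pre) :: rest) out
        = pvLoop ((((PySem.List.pyRange 0 (b + 1) 1).map
            (fun v => (k, b - v, v :: pre))).reverse) ++ rest) out from by rw [pvLoop],
      ih, List.flatMap_append]
    have hx : (((PySem.List.pyRange 0 (b + 1) 1).map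
          (fun v => (k, b - v, v :: pre))).reverse).flatMap
            (fun f => pvRec f.1 f.2.1 f.2.2.reverse)
        = pvRec (k + 1) b pre.reverse := by
      rw [show pvRec (k + 1) b pre.reverse
          = (PySem.List.pyRange b (-1) (-1)).flatMap
              (fun v => pvRec k (b - v) (pre.reverse ++ [v])) from rfl,
        PySem.List.pyRange_neg_one_eq_reverse,
        show (-1 : Int) + 1 = 0 from by ring,
        ← List.map_reverse, List.flatMap_map]
      refine List.flatMap_congr ?_
      intro v _
      simp [List.reverse_cons]
    rw [hx, List.flatMap_cons]
theorem pvRec_prefix (k : Nat) : ∀ (b : Int) (p : List Int),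
    pvRec k b p = (pvRec k b []).map (fun t => p ++ t) := by
  induction k with
  | zero => intro b p; by_cases h : b = 0 <;> simp [pvRec, h]
  | succ k ih =>
    intro b p
    simp only [pvRec, List.map_flatMap]
    refine List.flatMap_congr ?_
    intro v _
    rw [ih (b - v) (p ++ [v]), show ([] ++ [v] : List Int) = [v] by simp, ih (b - v) [v]]
    simp [List.map_map, Function.comp_def]

theorem pvRec_zero (k : Nat) : pvRec k 0 [] = [List.replicate k 0] := by
  induction k with
  | zero => simp [pvRec]
  | succ k ih =>
    have h : PySem.List.pyRange 0 (-1) (-1) = [0] := by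
      rw [PySem.List.pyRange_neg_one_cons (by norm_num)]
      simp [PySem.List.pyRange_neg_one_eq_nil]
    rw [show pvRec (k+1) 0 [] = (PySem.List.pyRange 0 (-1) (-1)).flatMap (fun v => pvRec k (0 - v) ([] ++ [v])) from rfl, h]
    simp only [List.flatMap_cons, List.flatMap_nil, List.append_nil, sub_zero, List.nil_append]
    rw [pvRec_prefix k 0 [0], ih]
    simp [List.replicate_succ]

theorem pvSetMapRange (n j : Nat) (v : Int) (g : Nat → Int) (_h : j < n) :
    ((List.range n).map g).set j v = (List.range n).map (fun i => if i = j then v else g i) := by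
  apply List.ext_getElem
  · simp
  · intro i h1 h2
    rw [List.getElem_set]
    by_cases hij : j = i
    · simp [hij]
    · have hij2 : ¬ i = j := fun h => hij h.symm
      simp [hij, hij2]

theorem pvCounts_char (n : Nat) : ∀ (cs : List Int) (g : Nat → Int),
    (∀ c ∈ cs, 0 ≤ c ∧ c < (n : Int)) →
    cs.foldl (fun counts c => counts.set c.toNat (counts.getD c.toNat 0 + 1))
      ((List.range n).map g)
    = (List.range n).map (fun i => g i + cs.count (i : Int)) := by
  intro cs
  induction cs with
  | nil => intro g _; simp
  | cons c cs ih =>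
    intro g h
    have hc := h c (List.mem_cons_self)
    have hlt : c.toNat < n := by omega
    have hget : ((List.range n).map g).getD c.toNat 0 = g c.toNat := by
      rw [List.getD_eq_getElem _ _ (by simpa using hlt)]
      simp
    rw [List.foldl_cons, hget, pvSetMapRange n c.toNat (g c.toNat + 1) g hlt,
      ih _ (fun x hx => h x (List.mem_cons_of_mem _ hx))]
    refine List.map_congr_left ?_
    intro i hi
    rw [List.mem_range] at hi
    simp only [List.count_cons, beq_iff_eq]
    by_cases hic : i = c.toNat
    · subst hic
      have hcc : ((c.toNat : Nat) : Int) = c := by omega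
      simp only [hcc]
      push_cast
      ring
    · have hcc2 : ¬ (c = (i : Int)) := by omega
      simp [hic, hcc2]

theorem pvCounts_eq (n : Nat) (cs : List Int) (h : ∀ c ∈ cs, 0 ≤ c ∧ c < (n : Int)) :
    pvCounts n cs = (List.range n).map (fun (i : Nat) => (cs.count ((i : Nat) : Int) : Int)) := by
  have hrep : (List.replicate n (0 : Int)) = (List.range n).map (fun _ => 0) := by
    rw [List.map_const', List.length_range]
  unfold pvCounts
  rw [hrep, pvCounts_char n cs (fun _ => 0) h]
  simp only [zero_add]

theorem pvCwr_mem (d : Nat) : ∀ (lo K : Int), ∀ combo ∈ pvCwr lo K d, ∀ c ∈ combo, lo ≤ c ∧ c < K := by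
  induction d with
  | zero => intro lo K combo h c hc; simp [pvCwr] at h; subst h; simp at hc
  | succ d ih =>
    intro lo K combo h c hc
    simp only [pvCwr, List.mem_flatMap, List.mem_map] at h
    obtain ⟨j, hj, t, ht, rfl⟩ := h
    rw [PySem.List.mem_pyRange_one] at hj
    rcases List.mem_cons.mp hc with rfl | hc
    · exact hj
    · have := ih j K t ht c hc
      exact ⟨le_trans hj.1 this.1, this.2⟩

theorem pyRange_desc_succ (b : Int) (hb : 0 ≤ b) :
    PySem.List.pyRange (b + 1) (-1) (-1)
    = (PySem.List.pyRange b (-1) (-1)).map (fun v => v + 1) ++ [0] := by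
  rw [PySem.List.pyRange_neg_one, PySem.List.pyRange_neg_one]
  have hm : (b + 1 - (-1)).toNat = (b - (-1)).toNat + 1 := by omega
  have hmc : (((b - (-1)).toNat : Nat) : Int) = b + 1 := by omega
  rw [hm, List.range_succ, List.map_append, List.map_map]
  congr 1
  · refine List.map_congr_left ?_
    intro k _
    simp only [Function.comp_apply]
    ring
  · simp
    omega

theorem pvRec_split (n : Nat) (b : Int) (hb : 0 ≤ b) :
    pvRec (n + 1) (b + 1) []
    = (pvRec (n + 1) b []).map (fun l => l.set 0 (l.getD 0 0 + 1))
      ++ (pvRec n (b + 1) []).map (fun t => 0 :: t) := by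
  rw [show pvRec (n + 1) (b + 1) []
        = (PySem.List.pyRange (b + 1) (-1) (-1)).flatMap
            (fun v => pvRec n (b + 1 - v) ([] ++ [v])) from rfl,
     show pvRec (n + 1) b []
        = (PySem.List.pyRange b (-1) (-1)).flatMap
            (fun v => pvRec n (b - v) ([] ++ [v])) from rfl,
     pyRange_desc_succ b hb, List.flatMap_append, List.map_flatMap]
  congr 1
  · rw [List.flatMap_map]
    refine List.flatMap_congr ?_
    intro v _
    have h1 : (b + 1 - (v + 1)) = b - v := by ring
    rw [h1, pvRec_prefix n (b - v) ([] ++ [v + 1]),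
        pvRec_prefix n (b - v) ([] ++ [v])]
    simp [List.map_map, Function.comp_def]
  · simp only [List.flatMap_cons, List.flatMap_nil, List.append_nil, List.nil_append, sub_zero]
    rw [pvRec_prefix n (b + 1) [0]]
    simp

-- main lemma: per fixed degree d, A's counts list equals B's composition recursion
theorem pvCountsCons0 (m : Nat) (cs : List Int) (hm : 0 < m)
    (h : ∀ c ∈ cs, 0 ≤ c ∧ c < (m : Int)) :
    pvCounts m (0 :: cs) = (pvCounts m cs).set 0 ((pvCounts m cs).getD 0 0 + 1) := by
  have h0 : ∀ c ∈ (0 :: cs : List Int), 0 ≤ c ∧ c < (m : Int) := by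
    intro c hc
    rcases List.mem_cons.mp hc with rfl | hc
    · exact ⟨le_rfl, by exact_mod_cast hm⟩
    · exact h c hc
  rw [pvCounts_eq m _ h0, pvCounts_eq m cs h,
    pvSetMapRange m 0 _ _ hm]
  have hget : ((List.range m).map (fun (i : Nat) => ((cs.count ((i : Nat) : Int)) : Int))).getD 0 0
      = (cs.count ((0 : Nat) : Int) : Int) := by
    rw [List.getD_eq_getElem _ _ (by simpa using hm)]
    simp
  rw [hget]
  refine List.map_congr_left ?_
  intro i hi
  simp only [List.count_cons, beq_iff_eq]
  by_cases hi0 : i = 0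
  · subst hi0; simp
  · have h2 : ¬ ((0 : Int) = (i : Int)) := by omega
    simp [hi0, h2]

theorem pvCountsShift (n : Nat) (cs : List Int)
    (h : ∀ c ∈ cs, 1 ≤ c ∧ c < (n : Int) + 1) :
    pvCounts (n + 1) cs = 0 :: pvCounts n (cs.map (fun c => c - 1)) := by
  have h1 : ∀ c ∈ cs, 0 ≤ c ∧ c < ((n + 1 : Nat) : Int) := by
    intro c hc; have := h c hc; push_cast; omega
  have h2 : ∀ c ∈ cs.map (fun c => c - 1), 0 ≤ c ∧ c < (n : Int) := by
    intro c hc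
    obtain ⟨x, hx, rfl⟩ := List.mem_map.mp hc
    have := h x hx; omega
  rw [pvCounts_eq (n + 1) cs h1, pvCounts_eq n _ h2, List.range_succ_eq_map,
    List.map_cons, List.map_map]
  congr 1
  · have hz : cs.count (0 : Int) = 0 := by
      refine List.count_eq_zero.mpr ?_
      intro hmem
      have := h 0 hmem; omega
    simp [hz]
  · refine List.map_congr_left ?_
    intro k _
    simp only [Function.comp_apply]
    have hinj : Function.Injective (fun c : Int => c - 1) := fun a b hab => by
      simpa using hab
    have hcnt : (cs.map (fun c => c - 1)).count ((k : Int)) = cs.count ((k : Int) + 1) := by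
      have := List.count_map_of_injective cs (fun c : Int => c - 1) hinj ((k : Int) + 1)
      simpa using this
    rw [hcnt]
    all_goals congr 1

theorem pvMain (d : Nat) : ∀ (lo K : Int), 0 ≤ lo →
    (pvCwr lo K d).map (fun combo => pvCounts (K - lo).toNat (combo.map (fun c => c - lo)))
    = pvRec (K - lo).toNat (d : Int) [] := by
  induction d with
  | zero =>
    intro lo K _
    simp [pvCwr, pvCounts, pvRec_zero]
  | succ d ihd =>
    intro lo K hlo
    suffices h : ∀ (n : Nat) (lo : Int), 0 ≤ lo → (K - lo).toNat = n →
        (pvCwr lo K (d + 1)).map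
          (fun combo => pvCounts n (combo.map (fun c => c - lo)))
        = pvRec n ((d : Int) + 1) [] by
      have := h (K - lo).toNat lo hlo rfl
      push_cast
      exact this
    intro n
    induction n with
    | zero =>
      intro lo _ hn
      have hKlo : K ≤ lo := by omega
      rw [show pvCwr lo K (d + 1)
            = (PySem.List.pyRange lo K 1).flatMap
                (fun j => (pvCwr j K d).map (j :: ·)) from rfl,
        PySem.List.pyRange_one_eq_nil hKlo]
      simp [pvRec]
      omega
    | succ n ihn =>
      intro lo hlo hn
      have hltK : lo < K := by omega
      have hKlo : K - lo = (n : Int) + 1 := by omega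
      rw [show pvCwr lo K (d + 1)
            = (PySem.List.pyRange lo K 1).flatMap
                (fun j => (pvCwr j K d).map (j :: ·)) from rfl,
        PySem.List.pyRange_one_cons hltK, List.flatMap_cons,
        show (PySem.List.pyRange (lo + 1) K 1).flatMap
                (fun j => (pvCwr j K d).map (j :: ·)) = pvCwr (lo + 1) K (d + 1) from rfl,
        List.map_append]
      have hpart2 :
          (pvCwr (lo + 1) K (d + 1)).map
            (fun combo => pvCounts (n + 1) (combo.map (fun c => c - lo)))
          = ((pvCwr (lo + 1) K (d + 1)).map
              (fun combo => pvCounts n (combo.map (fun c => c - (lo + 1))))).map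
              (fun t => 0 :: t) := by
        rw [List.map_map]
        refine List.map_congr_left ?_
        intro combo hcombo
        have hmem := pvCwr_mem (d + 1) (lo + 1) K combo hcombo
        have hsh : ∀ c ∈ combo.map (fun c => c - lo), 1 ≤ c ∧ c < (n : Int) + 1 := by
          intro c hc
          obtain ⟨x, hx, rfl⟩ := List.mem_map.mp hc
          have := hmem x hx; omega
        rw [pvCountsShift n _ hsh]
        simp only [Function.comp_apply, List.map_map]
        congr 2
        refine List.map_congr_left ?_
        intro x _
        simp only [Function.comp_apply]
        ring
      have hpart1 :
          ((pvCwr lo K d).map (lo :: ·)).map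
            (fun combo => pvCounts (n + 1) (combo.map (fun c => c - lo)))
          = ((pvCwr lo K d).map
              (fun combo => pvCounts (n + 1) (combo.map (fun c => c - lo)))).map
              (fun l => l.set 0 (l.getD 0 0 + 1)) := by
        rw [List.map_map, List.map_map]
        refine List.map_congr_left ?_
        intro combo hcombo
        have hmem := pvCwr_mem d lo K combo hcombo
        have hsh : ∀ c ∈ combo.map (fun c => c - lo), 0 ≤ c ∧ c < ((n + 1 : Nat) : Int) := by
          intro c hc
          obtain ⟨x, hx, rfl⟩ := List.mem_map.mp hc
          have := hmem x hx; push_cast; omega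
        simp only [Function.comp_apply, List.map_cons, sub_self]
        rw [pvCountsCons0 (n + 1) _ (Nat.succ_pos n) (by exact_mod_cast hsh)]
      rw [hpart1, hpart2]
      have hA := ihd lo K hlo
      rw [hKlo] at hA
      have hAn : ((n : Int) + 1).toNat = n + 1 := by omega
      rw [hAn] at hA
      rw [hA, ihn (lo + 1) (by omega) (by omega), ← pvRec_split n (d : Int) (Int.natCast_nonneg d)]

theorem pvMain0 (K : Int) (d : Nat) :
    (pvCwr 0 K d).map (pvCounts K.toNat) = pvRec K.toNat (d : Int) [] := by
  have := pvMain d 0 K le_rfl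
  simpa using this

-- ===== VERDICT (by name: the statement is the Claim_ definition above) =====
theorem multi_index_up_to_py_spec : Claim_equal_multi_index_up_to_py := by
  intro K max_deg _
  unfold Spec_multi_index_up_to_py multi_index_up_to_py multi_index_up_to_py_alt
  have hB : (fun (out : List (List Int)) (d : Int) => pvLoop [(K.toNat, d, [])] out)
      = fun out d => out ++ pvRec K.toNat d [] := by
    funext out d
    rw [pvLoop_spec]
    simp
  rw [hB, PySem.List.foldl_append_eq_flatMap, PySem.List.foldl_append_eq_flatMap]
  refine List.flatMap_congr ?_
  intro d hd
  rw [PySem.List.mem_pyRange_one] at hd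
  have : ((d.toNat : Nat) : Int) = d := Int.toNat_of_nonneg hd.1
  rw [pvMain0, this]
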